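-- pv_equiv track=rewrite | github.com/Bounty-hunter/toolbox | Data_process/GenJson/ais_bench_json_gen.py | generate_question_prompt
-- ===== SOURCE A (Python) =====
-- def generate_question_prompt(n: int) -> str:
--     base = f"explain about the images"
--     if n <= len(base):
--         return base[:n]
--
--     digits = 0
--     while True:
--         segment = f", {digits}"
--         base += segment
--         if len(base) >= n:
--             return base[:n]
--         digits += 1
-- ===== SOURCE B (Python) =====
-- def generate_question_prompt(n: int) -> str:
--     base = "explain about the images"
--     if n <= len(base):
--         return base[:n]
--     # Each segment ", i" contributes at least 3 characters, so n segments
--     # certainly reach length n; slicing removes the overshoot.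
--     parts = [base] + [f", {i}" for i in range(n)]
--     return "".join(parts)[:n]
-- ===== Notes on version B (the rewrite author's own statement) =====
-- stated objective: simpler
-- what changed: Replaces the incremental while-loop with a per-iteration length test by a single bulk build: join base with a fixed overestimate of segments ', 0', ', 1', ... (one per i in range(n)) and slice the result to n; there is no dynamic stopping condition at all.
import Mathlib
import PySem

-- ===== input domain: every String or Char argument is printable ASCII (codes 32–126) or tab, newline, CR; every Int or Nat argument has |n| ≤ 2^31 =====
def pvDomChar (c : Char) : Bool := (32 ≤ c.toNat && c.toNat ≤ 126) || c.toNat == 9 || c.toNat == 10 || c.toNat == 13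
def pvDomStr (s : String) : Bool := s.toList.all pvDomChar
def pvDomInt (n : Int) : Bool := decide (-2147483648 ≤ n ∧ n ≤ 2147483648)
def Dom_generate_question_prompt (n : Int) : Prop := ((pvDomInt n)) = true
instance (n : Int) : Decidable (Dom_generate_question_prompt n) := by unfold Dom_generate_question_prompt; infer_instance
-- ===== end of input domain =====

-- B replaces A's incremental while-loop (append a segment, test the length, maybe stop)
-- by a bulk build with no stopping condition: join base with n overestimated segments
-- ", 0", ", 1", …, then slice to n. Objective: simpler.


-- ===== PORT A =====
-- the f-string segment f", {d}" as a char list (shared by both ports, as by both Pythons)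
def pvSeg (d : Int) : List Char := [',', ' '] ++ PySem.Int.toChars d

-- A's while-loop: append segment f", {d}", stop as soon as the length reaches n.
-- fuel is a pure totality guard (never reached with the fuel the caller passes:
-- every iteration adds at least 3 characters, see pvLoopA_eq below).
def pvLoopA (n d : Int) (base : List Char) : Nat → List Char
  | 0 => base
  | fuel + 1 =>
    if n ≤ (((base ++ pvSeg d).length : Nat) : Int) then
      PySem.List.slice (base ++ pvSeg d) none (some n)
    else
      pvLoopA n (d + 1) (base ++ pvSeg d) fuel

def generate_question_prompt (n : Int) : String :=
  if n ≤ (("explain about the images".toList.length : Nat) : Int) then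
    String.ofList (PySem.List.slice "explain about the images".toList none (some n))
  else
    String.ofList (pvLoopA n 0 "explain about the images".toList n.toNat)

-- ===== PORT B =====
def generate_question_prompt_alt (n : Int) : String :=
  if n ≤ (("explain about the images".toList.length : Nat) : Int) then
    String.ofList (PySem.List.slice "explain about the images".toList none (some n))
  else
    String.ofList (PySem.List.slice
      ("explain about the images".toList :: (PySem.List.pyRange 0 n 1).map pvSeg).flatten
      none (some n))

-- ===== PRECONDITION & SPEC =====
def Spec_generate_question_prompt (n : Int) (out : String) : Prop := out = generate_question_prompt_alt n
instance (n : Int) (out : String) : Decidable (Spec_generate_question_prompt n out) := by unfold Spec_generate_question_prompt; infer_instance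

-- ===== CLAIM (what is proved, stated in full; the proofs are below) =====
def Claim_equal_generate_question_prompt : Prop := ∀ (n : Int), Dom_generate_question_prompt n → Spec_generate_question_prompt n (generate_question_prompt n)

-- ===== LEMMAS AND PROOFS =====

-- str(d) is never empty, so every loop iteration adds at least 3 characters
theorem pvToDigitsCore_len (b : Nat) : ∀ (fuel n : Nat) (ds : List Char),
    ds.length ≤ (Nat.toDigitsCore b fuel n ds).length := by
  intro fuel
  induction fuel with
  | zero => intro n ds; simp [Nat.toDigitsCore]
  | succ f ih =>
    intro n ds
    unfold Nat.toDigitsCore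
    by_cases h0 : n / b = 0
    · simp [h0]
    · simp only [h0, reduceIte]
      exact Nat.le_trans (by simp) (ih _ _)

theorem pvToDigits_pos (b n : Nat) : 1 ≤ (Nat.toDigits b n).length := by
  rw [Nat.toDigits]
  unfold Nat.toDigitsCore
  by_cases h0 : n / b = 0
  · simp [h0]
  · simp only [h0, reduceIte]
    simpa using pvToDigitsCore_len b n (n / b) [(n % b).digitChar]

theorem pvSeg_len (d : Int) : 3 ≤ (pvSeg d).length := by
  have h1 : 1 ≤ (PySem.Int.toChars d).length := by
    simp only [PySem.Int.toChars]
    split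
    · simp
    · exact pvToDigits_pos 10 _
  simp only [pvSeg, List.length_append, List.length_cons, List.length_nil]
  omega


-- The loop, started at digit d with an accumulator acc still short of n, produces the
-- n-prefix of acc ++ segments d, d+1, …, e-1, for ANY e large enough that the three
-- guaranteed characters per segment certainly cover n.
theorem pvLoopA_eq (n : Int) : ∀ (fuel : Nat) (d e : Int) (acc : List Char),
    n.toNat ≤ acc.length + fuel → ((acc.length : Nat) : Int) < n →
    n ≤ ((acc.length : Nat) : Int) + 3 * (e - d) →
    pvLoopA n d acc fuel =
      PySem.List.slice (acc ++ ((PySem.List.pyRange d e 1).map pvSeg).flatten) none (some n) := by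
  intro fuel
  induction fuel with
  | zero =>
    intro d e acc hk hlt hcov
    omega
  | succ k ih =>
    intro d e acc hk hlt hcov
    have hde : d < e := by omega
    have h3 := pvSeg_len d
    rw [PySem.List.pyRange_one_cons hde]
    simp only [List.map_cons, List.flatten_cons, ← List.append_assoc]
    rw [pvLoopA]
    split
    · -- stopped: the length reached n, the extra segments are cut off by the slice
      rename_i hstop
      have hn : (0:Int) ≤ n := by omega
      rw [PySem.List.slice_to _ hn, PySem.List.slice_to _ hn,
        List.take_append_of_le_length (l₁ := acc ++ pvSeg d) (by omega)]
    · rename_i hgo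
      have := ih (d + 1) e (acc ++ pvSeg d)
        (by simp only [List.length_append] at *; omega)
        (by simp only [not_le] at hgo; exact hgo)
        (by simp only [List.length_append] at *; push_cast at *; omega)
      simpa using this

-- ===== VERDICT (by name: the statement is the Claim_ definition above) =====
theorem generate_question_prompt_spec : Claim_equal_generate_question_prompt := by
  intro n _
  unfold Spec_generate_question_prompt generate_question_prompt generate_question_prompt_alt
  by_cases h : n ≤ (("explain about the images".toList.length : Nat) : Int)
  · rw [if_pos h, if_pos h]
  · have hlen : "explain about the images".toList.length = 24 := by decide
    have h24 : (24:Int) < n := by rw [hlen] at h; omega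
    rw [if_neg h, if_neg h, List.flatten_cons,
      pvLoopA_eq n n.toNat 0 n _ (by omega) (by rw [hlen]; omega) (by rw [hlen]; push_cast; omega)]
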